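-- pv_equiv track=rewrite | github.com/danimcgu98/python | cryptoverter/playfair_funcs.py | add_text_between_same_char
-- ===== SOURCE A (Python) =====
-- def add_text_between_same_char(text):
--
--     new_text = ''
--     null_value = 'x'
--     text_len = len(text)
--
--     for i in range(text_len):
--         if i + 1 != text_len and i % 2 == 0 and text[i] == text[i+1]:
--             new_text += text[i]
--             new_text += null_value
--         else:
--             new_text += text[i]
--
--     return new_text
-- ===== SOURCE B (Python) =====
-- def add_text_between_same_char(text):
--     parts = []
--     for i in range(0, len(text), 2):
--         pair = text[i:i+2]
--         if len(pair) == 2 and pair[0] == pair[1]: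
--             parts.append(pair[0] + 'x' + pair[1])
--         else:
--             parts.append(pair)
--     return ''.join(parts)
-- ===== Notes on version B (the rewrite author's own statement) =====
-- stated objective: simpler
-- what changed: B iterates over the text two characters at a time (range step 2 with a slice per digraph), appending each pair with the filler letter inserted when the pair repeats, instead of A's per-index loop with a parity test and lookahead; it joins a parts list instead of concatenating per character.
import Mathlib
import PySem

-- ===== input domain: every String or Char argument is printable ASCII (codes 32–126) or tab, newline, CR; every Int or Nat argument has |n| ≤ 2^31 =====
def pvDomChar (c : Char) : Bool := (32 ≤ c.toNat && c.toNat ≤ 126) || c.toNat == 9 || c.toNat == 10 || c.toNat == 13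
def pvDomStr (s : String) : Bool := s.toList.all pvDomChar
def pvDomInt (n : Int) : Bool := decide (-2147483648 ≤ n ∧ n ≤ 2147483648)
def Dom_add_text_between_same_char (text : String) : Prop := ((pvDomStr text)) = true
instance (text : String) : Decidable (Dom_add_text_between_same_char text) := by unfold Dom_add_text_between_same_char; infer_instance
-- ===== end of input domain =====

-- B processes the text digraph by digraph (two chars at a time) instead of A's per-index
-- parity test; same return value, the rewrite is a simpler decomposition, not faster.

-- ===== PORT A =====
-- loop body of A: for index i, append text[i] (plus 'x' when an even-indexed pair repeats)
def bodyA (cs : List Char) (n : Int) (acc : List Char) (i : Int) : List Char :=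
  if i + 1 ≠ n ∧ PySem.Int.mod i 2 = 0 ∧ PySem.List.pyGetD cs i ' ' = PySem.List.pyGetD cs (i+1) ' '
  then acc ++ [PySem.List.pyGetD cs i ' ', 'x']
  else acc ++ [PySem.List.pyGetD cs i ' ']

def add_text_between_same_char (text : String) : String :=
  let cs := text.toList
  let n : Int := (cs.length : Int)
  String.mk ((PySem.List.pyRange 0 n 1).foldl (bodyA cs n) [])

-- ===== PORT B =====
-- B's `for i in range(0, len(text), 2)` pair loop, transcribed as two-at-a-time recursion
def altGo : List Char → List Char
  | a :: b :: rest => if a = b then a :: 'x' :: b :: altGo rest else a :: b :: altGo rest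
  | xs => xs

def add_text_between_same_char_alt (text : String) : String :=
  String.mk (altGo text.toList)

-- ===== PRECONDITION & SPEC =====
def Spec_add_text_between_same_char (text : String) (out : String) : Prop := out = add_text_between_same_char_alt text
instance (text : String) (out : String) : Decidable (Spec_add_text_between_same_char text out) := by unfold Spec_add_text_between_same_char; infer_instance

-- ===== CLAIM (what is proved, stated in full; the proofs are below) =====
def Claim_equal_add_text_between_same_char : Prop := ∀ (text : String), Dom_add_text_between_same_char text → Spec_add_text_between_same_char text (add_text_between_same_char text)

-- ===== LEMMAS AND PROOFS =====

-- A's loop from any even start index k produces exactly B's pair-recursion on the suffix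
lemma loopA (cs : List Char) (k : Nat) (acc : List Char) (hk : k % 2 = 0) :
    (PySem.List.pyRange (k : Int) (cs.length : Int) 1).foldl (bodyA cs (cs.length : Int)) acc
      = acc ++ altGo (cs.drop k) := by
  have hmod : PySem.Int.mod (k : Int) 2 = ((k % 2 : Nat) : Int) := by
    exact_mod_cast PySem.Int.mod_natCast k 2
  by_cases h1 : cs.length ≤ k
  · rw [PySem.List.pyRange_one_eq_nil (by exact_mod_cast h1)]
    simp [List.drop_eq_nil_of_le h1, altGo]
  · rw [not_le] at h1
    have hga : PySem.List.pyGetD cs (k : Int) ' ' = cs[k] := by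
      rw [PySem.List.pyGetD_natCast]; exact List.getD_eq_getElem _ _ h1
    by_cases h2 : cs.length = k + 1
    · have : (PySem.List.pyRange (k : Int) (cs.length : Int) 1) = [(k : Int)] := by
        rw [h2]; push_cast; exact PySem.List.pyRange_one_singleton _
      rw [this]
      have hdrop : cs.drop k = [cs[k]] := by
        rw [List.drop_eq_getElem_cons h1, List.drop_eq_nil_of_le (by omega)]
      simp only [List.foldl, bodyA]
      rw [if_neg]
      · simp [hdrop, altGo, hga]
      · rintro ⟨hne, -, -⟩; apply hne; push_cast; omega
    · have hk2 : k + 2 ≤ cs.length := by omega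
      have hcast : ((k : Int) + 1) = ((k + 1 : Nat) : Int) := by push_cast; ring
      have hgb : PySem.List.pyGetD cs ((k : Int) + 1) ' ' = cs[k+1] := by
        rw [hcast, PySem.List.pyGetD_natCast]
        exact List.getD_eq_getElem _ _ (by omega)
      have hr : (PySem.List.pyRange (k : Int) (cs.length : Int) 1)
          = (k : Int) :: ((k : Int) + 1) :: PySem.List.pyRange ((k : Int) + 1 + 1) (cs.length : Int) 1 := by
        rw [PySem.List.pyRange_one_cons (by exact_mod_cast h1),
            PySem.List.pyRange_one_cons (by push_cast; omega)]
      have hdrop : cs.drop k = cs[k] :: cs[k+1] :: cs.drop (k+1+1) := by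
        rw [List.drop_eq_getElem_cons (show k < cs.length by omega),
            List.drop_eq_getElem_cons (show k + 1 < cs.length by omega)]
        rfl
      have step1 : bodyA cs (cs.length : Int) acc (k : Int)
          = acc ++ (if cs[k] = cs[k+1] then [cs[k], 'x'] else [cs[k]]) := by
        simp only [bodyA, hga, hgb]
        by_cases he : cs[k] = cs[k+1]
        · rw [if_pos he, if_pos ⟨by push_cast; omega, by rw [hmod, hk]; rfl, he⟩]
        · rw [if_neg he, if_neg (by rintro ⟨-, -, hx⟩; exact he hx)]
      have step2 : ∀ a : List Char, bodyA cs (cs.length : Int) a ((k : Int) + 1)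
          = a ++ [cs[k+1]] := by
        intro a
        simp only [bodyA, hgb]
        rw [if_neg]
        rintro ⟨-, hm, -⟩
        rw [hcast] at hm
        have hm2 : PySem.Int.mod ((k+1 : Nat) : Int) 2 = (((k+1) % 2 : Nat) : Int) := by
          exact_mod_cast PySem.Int.mod_natCast (k+1) 2
        rw [hm2] at hm
        omega
      have hcast2 : ((k : Int) + 1 + 1) = ((k + 1 + 1 : Nat) : Int) := by push_cast; ring
      have ih := loopA cs (k + 1 + 1) (acc ++ (if cs[k] = cs[k+1] then [cs[k], 'x'] else [cs[k]]) ++ [cs[k+1]]) (by omega)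
      rw [hr]
      simp only [List.foldl, step1, step2]
      rw [hcast2, ih, hdrop]
      by_cases he : cs[k] = cs[k+1] <;> simp [altGo, he]
termination_by cs.length - k

-- ===== VERDICT (by name: the statement is the Claim_ definition above) =====
theorem add_text_between_same_char_spec : Claim_equal_add_text_between_same_char := by
  unfold Claim_equal_add_text_between_same_char
  intro text _
  unfold Spec_add_text_between_same_char add_text_between_same_char add_text_between_same_char_alt
  have h := loopA text.toList 0 [] rfl
  simp only [Nat.cast_zero, List.drop_zero, List.nil_append] at h
  show String.mk ((PySem.List.pyRange 0 (text.toList.length : Int) 1).foldl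
      (bodyA text.toList (text.toList.length : Int)) []) = String.mk (altGo text.toList)
  rw [h]
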